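-- pv_equiv track=rewrite | github.com/akiva-skolnik/leetcode | algo_expert/river-sizes.py | river_size
-- ===== SOURCE A (Python) =====
-- def river_size(matrix: list, i: int, j: int) -> int:
--     if 0 <= i < len(matrix) and 0 <= j < len(matrix[i]) and matrix[i][j] == 1:
--         matrix[i][j] = 0
--         return 1 + river_size(matrix, i - 1, j) + \
--             river_size(matrix, i + 1, j) + \
--             river_size(matrix, i, j - 1) + \
--             river_size(matrix, i, j + 1)
--     else:
--         return 0
-- ===== SOURCE B (Python) =====
-- def river_size(matrix: list, i: int, j: int) -> int:
--     count = 0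
--     stack = [(i, j)]
--     while stack:
--         r, c = stack.pop()
--         if 0 <= r < len(matrix) and 0 <= c < len(matrix[r]) and matrix[r][c] == 1:
--             matrix[r][c] = 0
--             count += 1
--             stack.extend([(r, c + 1), (r, c - 1), (r + 1, c), (r - 1, c)])
--     return count
-- ===== Notes on version B (the rewrite author's own statement) =====
-- stated objective: alternative
-- what changed: Replaced the recursive four-way DFS with an iterative flood fill over an explicit work-stack: pop a cell, zero-and-count it if it is an in-bounds 1, and push its four neighbours.
import Mathlib
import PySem

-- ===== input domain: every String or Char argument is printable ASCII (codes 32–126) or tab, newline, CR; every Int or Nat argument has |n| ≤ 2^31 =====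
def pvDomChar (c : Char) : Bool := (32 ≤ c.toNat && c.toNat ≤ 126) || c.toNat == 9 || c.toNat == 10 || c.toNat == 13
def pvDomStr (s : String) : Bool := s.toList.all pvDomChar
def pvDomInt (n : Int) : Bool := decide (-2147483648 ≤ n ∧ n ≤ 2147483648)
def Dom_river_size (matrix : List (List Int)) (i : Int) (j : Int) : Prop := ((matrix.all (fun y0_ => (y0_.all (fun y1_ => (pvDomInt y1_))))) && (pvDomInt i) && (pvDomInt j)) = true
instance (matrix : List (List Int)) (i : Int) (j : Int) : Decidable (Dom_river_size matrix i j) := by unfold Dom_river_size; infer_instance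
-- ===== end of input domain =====

-- B replaces A's recursive four-way DFS by an iterative flood fill with an explicit work-stack
-- (alternative decomposition, same cost). Both A and B zero the visited component in the caller's
-- matrix in place; the equivalence proved here is about the RETURN value only.


-- shared tiny helpers (Python's bounds+value test and in-place zeroing, used by both ports)
def pvCond (m : List (List Int)) (i j : Int) : Bool :=
  decide (0 ≤ i) && decide (i < (m.length : Int)) && decide (0 ≤ j) &&
  decide (j < ((m.getD i.toNat []).length : Int)) && ((m.getD i.toNat []).getD j.toNat 0 == 1)

def pvSet (m : List (List Int)) (i j : Int) : List (List Int) :=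
  m.set i.toNat ((m.getD i.toNat []).set j.toNat 0)

def pvOnes (m : List (List Int)) : Nat := (m.map (fun r => r.count 1)).sum

lemma pvCount_set_one : ∀ (r : List Int) (k : Nat), k < r.length → r.getD k 0 = 1 →
    (r.set k 0).count 1 + 1 = r.count 1 := by
  intro r
  induction r with
  | nil => intro k hk; simp at hk
  | cons a t ih =>
    intro k hk h1
    cases k with
    | zero => simp_all
    | succ k =>
      simp only [List.set_cons_succ, List.count_cons]
      have := ih k (by simpa using hk) (by simpa using h1)
      omega

lemma pvOnes_setRow : ∀ (m : List (List Int)) (k : Nat) (row : List Int), k < m.length →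
    pvOnes (m.set k row) + (m.getD k []).count 1 = pvOnes m + row.count 1 := by
  intro m
  induction m with
  | nil => intro k _ hk; simp at hk
  | cons a t ih =>
    intro k row hk
    cases k with
    | zero => simp [pvOnes]; omega
    | succ k =>
      have := ih k row (by simpa using hk)
      simp only [List.set_cons_succ, List.getD_cons_succ, pvOnes, List.map_cons, List.sum_cons] at *
      omega

-- the termination fact both matrix-zeroing steps rely on
lemma pvOnes_pvSet (m : List (List Int)) (i j : Int) (h : pvCond m i j = true) :
    pvOnes (pvSet m i j) + 1 = pvOnes m := by
  simp only [pvCond, Bool.and_eq_true, decide_eq_true_eq, beq_iff_eq] at h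
  obtain ⟨⟨⟨⟨hi0, hil⟩, hj0⟩, hjl⟩, hv⟩ := h
  have hiN : i.toNat < m.length := by omega
  have hjN : j.toNat < (m.getD i.toNat []).length := by omega
  have h1 := pvCount_set_one (m.getD i.toNat []) j.toNat hjN hv
  have h2 := pvOnes_setRow m i.toNat ((m.getD i.toNat []).set j.toNat 0) hiN
  unfold pvSet
  omega

-- ===== PORT A =====
-- Literal port of A's recursion; the Nat argument is a fuel/totality guard only,
-- `pvOnes matrix + 1` always suffices (proved below), so the guard branch is never taken.
def riverA : Nat → List (List Int) → Int → Int → Int × List (List Int)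
  | 0, m, _, _ => (0, m)
  | f + 1, m, i, j =>
    if pvCond m i j then
      let m0 := pvSet m i j
      let p1 := riverA f m0 (i - 1) j
      let p2 := riverA f p1.2 (i + 1) j
      let p3 := riverA f p2.2 i (j - 1)
      let p4 := riverA f p3.2 i (j + 1)
      (1 + p1.1 + p2.1 + p3.1 + p4.1, p4.2)
    else (0, m)

def river_size (matrix : List (List Int)) (i : Int) (j : Int) : Int :=
  (riverA (pvOnes matrix + 1) matrix i j).1

-- ===== PORT B =====
-- Literal port of B's while-loop: list head = top of the Python stack
-- (Python pushes (r,c+1),(r,c-1),(r+1,c),(r-1,c) and pops from the end).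
def riverB (stack : List (Int × Int)) (m : List (List Int)) (acc : Int) : Int :=
  match stack with
  | [] => acc
  | (r, c) :: rest =>
    if h : pvCond m r c = true then
      riverB ((r - 1, c) :: (r + 1, c) :: (r, c - 1) :: (r, c + 1) :: rest) (pvSet m r c) (acc + 1)
    else
      riverB rest m acc
termination_by 5 * pvOnes m + stack.length
decreasing_by
  · have := pvOnes_pvSet m r c h
    simp only [List.length_cons]
    omega
  · simp only [List.length_cons]
    omega

def river_size_alt (matrix : List (List Int)) (i : Int) (j : Int) : Int :=
  riverB [(i, j)] matrix 0

-- ===== PRECONDITION & SPEC =====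
def Spec_river_size (matrix : List (List Int)) (i : Int) (j : Int) (out : Int) : Prop := out = river_size_alt matrix i j
instance (matrix : List (List Int)) (i : Int) (j : Int) (out : Int) : Decidable (Spec_river_size matrix i j out) := by unfold Spec_river_size; infer_instance

-- ===== CLAIM (what is proved, stated in full; the proofs are below) =====
def Claim_equal_river_size : Prop := ∀ (matrix : List (List Int)) (i : Int) (j : Int), Dom_river_size matrix i j → Spec_river_size matrix i j (river_size matrix i j)

-- ===== LEMMAS AND PROOFS =====

lemma riverB_nil (m : List (List Int)) (acc : Int) : riverB [] m acc = acc := by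
  rw [riverB]

lemma riverB_cons_true (r c : Int) (rest : List (Int × Int)) (m : List (List Int)) (acc : Int)
    (h : pvCond m r c = true) :
    riverB ((r, c) :: rest) m acc =
      riverB ((r - 1, c) :: (r + 1, c) :: (r, c - 1) :: (r, c + 1) :: rest) (pvSet m r c) (acc + 1) := by
  rw [riverB]; simp [h]

lemma riverB_cons_false (r c : Int) (rest : List (Int × Int)) (m : List (List Int)) (acc : Int)
    (h : ¬ pvCond m r c = true) :
    riverB ((r, c) :: rest) m acc = riverB rest m acc := by
  rw [riverB]; simp [h]

lemma pvOnes_riverA : ∀ (f : Nat) (m : List (List Int)) (i j : Int),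
    pvOnes (riverA f m i j).2 ≤ pvOnes m := by
  intro f
  induction f with
  | zero => intro m i j; simp [riverA]
  | succ f ih =>
    intro m i j
    rw [riverA]
    by_cases h : pvCond m i j = true
    · simp only [h, if_true]
      have h0 := pvOnes_pvSet m i j h
      have h1 := ih (pvSet m i j) (i - 1) j
      have h2 := ih (riverA f (pvSet m i j) (i - 1) j).2 (i + 1) j
      have h3 := ih (riverA f (riverA f (pvSet m i j) (i - 1) j).2 (i + 1) j).2 i (j - 1)
      have h4 := ih (riverA f (riverA f (riverA f (pvSet m i j) (i - 1) j).2 (i + 1) j).2 i (j - 1)).2 i (j + 1)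
      omega
    · simp [h]

lemma riverB_eq_riverA : ∀ (f : Nat) (m : List (List Int)) (i j : Int)
    (rest : List (Int × Int)) (acc : Int), pvOnes m + 1 ≤ f →
    riverB ((i, j) :: rest) m acc = riverB rest (riverA f m i j).2 (acc + (riverA f m i j).1) := by
  intro f
  induction f with
  | zero => intro m i j rest acc hf; omega
  | succ f ih =>
    intro m i j rest acc hf
    rw [riverA]
    by_cases h : pvCond m i j = true
    · simp only [h, if_true]
      have h0 := pvOnes_pvSet m i j h
      set m0 := pvSet m i j with hm0
      have a1 := pvOnes_riverA f m0 (i - 1) j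
      set p1 := riverA f m0 (i - 1) j with hp1
      have a2 := pvOnes_riverA f p1.2 (i + 1) j
      set p2 := riverA f p1.2 (i + 1) j with hp2
      have a3 := pvOnes_riverA f p2.2 i (j - 1)
      set p3 := riverA f p2.2 i (j - 1) with hp3
      set p4 := riverA f p3.2 i (j + 1) with hp4
      rw [riverB_cons_true i j rest m acc h]
      rw [ih m0 (i - 1) j _ _ (by omega)]
      rw [ih p1.2 (i + 1) j _ _ (by omega)]
      rw [ih p2.2 i (j - 1) _ _ (by omega)]
      rw [ih p3.2 i (j + 1) _ _ (by omega)]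
      congr 1
      ring
    · simp only [h]
      rw [riverB_cons_false i j rest m acc h]
      simp

-- ===== VERDICT (by name: the statement is the Claim_ definition above) =====
theorem river_size_spec : Claim_equal_river_size := by
  intro matrix i j _
  unfold Spec_river_size river_size river_size_alt
  rw [riverB_eq_riverA (pvOnes matrix + 1) matrix i j [] 0 (le_refl _)]
  rw [riverB_nil]
  omega
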